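-- pv_equiv track=rewrite | github.com/bodsch/ansible-plugins | filter_plugins/list_filters/list_filters.py | list_test
-- ===== SOURCE A (Python) =====
-- from collections import defaultdict
-- from operator import itemgetter, attrgetter
--
-- def list_test(l1, l2, index):
--     d = defaultdict(dict)
--     for l in (l1, l2):
--         for elem in l:
--             if index in elem.keys():
--                 d[elem[index]].update(elem)
--     if d.values():
--         return sorted(d.values(), key=itemgetter(index))
--     else:
--         return d.values()
-- ===== SOURCE B (Python) =====
-- def list_test(l1, l2, index):
--     items = [e for l in (l1, l2) for e in l if index in e]
--     out = []
--     for k in sorted({e[index] for e in items}):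
--         m = {}
--         for e in items:
--             if e[index] == k:
--                 m.update(e)
--         out.append(m)
--     return out
-- ===== Notes on version B (the rewrite author's own statement) =====
-- stated objective: alternative
-- what changed: A builds a defaultdict of dicts keyed by elem[index] via successive .update and then sorts its values; B is key-first: it collects the elements carrying index, sorts the distinct index values, and builds each merged dict by one per-key merging pass, so the dict-of-dicts disappears. Pre_ excludes inner association lists with duplicate keys, which do not represent a Python dict under the type convention.
import Mathlib
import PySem

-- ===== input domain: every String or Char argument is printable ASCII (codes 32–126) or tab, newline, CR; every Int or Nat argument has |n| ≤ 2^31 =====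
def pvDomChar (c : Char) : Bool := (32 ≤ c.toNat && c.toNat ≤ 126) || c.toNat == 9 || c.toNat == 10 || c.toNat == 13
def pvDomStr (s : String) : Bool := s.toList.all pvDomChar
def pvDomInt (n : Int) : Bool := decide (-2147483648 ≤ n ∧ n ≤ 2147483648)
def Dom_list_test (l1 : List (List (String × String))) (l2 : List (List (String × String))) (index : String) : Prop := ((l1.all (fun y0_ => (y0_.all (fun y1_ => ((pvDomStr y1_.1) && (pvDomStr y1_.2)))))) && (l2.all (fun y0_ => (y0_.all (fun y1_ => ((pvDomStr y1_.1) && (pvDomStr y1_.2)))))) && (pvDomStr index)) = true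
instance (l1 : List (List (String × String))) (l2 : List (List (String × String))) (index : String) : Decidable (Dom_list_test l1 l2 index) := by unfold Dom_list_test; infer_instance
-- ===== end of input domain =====

-- B replaces A's defaultdict-of-dicts (build keyed dict, then sort its values) by a key-first
-- decomposition: collect the distinct index values, sort them, and merge the matching elements
-- per key — same cost class, no dict of dicts (objective: alternative; return value only).

-- ===== PORT A =====
-- d[elem[index]]: the key is present (checked by `index in elem.keys()`), so getD is exact here.
def list_test (l1 : List (List (String × String))) (l2 : List (List (String × String))) (index : String) : List (List (String × String)) :=
  let d := [l1, l2].foldl (fun d l =>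
    l.foldl (fun d elem =>
      if (PySem.Dict.mk elem).contains index then
        d.insert ((PySem.Dict.mk elem).getD index "")
          (PySem.Dict.update (d.getD ((PySem.Dict.mk elem).getD index "") PySem.Dict.empty) elem)
      else d) d) PySem.Dict.empty
  if d.values.isEmpty then
    d.values.map PySem.Dict.items
  else
    (PySem.List.sorted d.values (fun m => m.getD index "")).map PySem.Dict.items

-- ===== PORT B =====
def list_test_alt (l1 : List (List (String × String))) (l2 : List (List (String × String))) (index : String) : List (List (String × String)) :=
  let items := (l1 ++ l2).filter (fun e => (PySem.Dict.mk e).contains index)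
  let keys := PySem.List.sorted (PySem.Set.ofList (items.map (fun e => (PySem.Dict.mk e).getD index ""))) (fun k => k)
  keys.foldl (fun out k =>
    out ++ [(items.foldl (fun m e =>
        if ((PySem.Dict.mk e).getD index "" == k) then PySem.Dict.update m e else m)
      PySem.Dict.empty).items]) []

-- ===== PRECONDITION & SPEC =====
-- Pre_ excludes inner association lists with duplicate keys: those do not represent a Python
-- dict (the declared element type dict[str,str] collapses them before A ever runs), and the
-- assoc-list lookup convention (first match) is ambiguous there.
def Pre_list_test (l1 : List (List (String × String))) (l2 : List (List (String × String))) (_index : String) : Prop :=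
  ∀ e ∈ l1 ++ l2, (e.map Prod.fst).Nodup
instance (l1 : List (List (String × String))) (l2 : List (List (String × String))) (index : String) : Decidable (Pre_list_test l1 l2 index) := by unfold Pre_list_test; infer_instance
def pvWitness_list_test : (List (List (String × String))) × (List (List (String × String))) × String :=
  ([[("k", "1"), ("v", "a")]], [[("k", "1"), ("w", "b")]], "k")
def Spec_list_test (l1 : List (List (String × String))) (l2 : List (List (String × String))) (index : String) (out : List (List (String × String))) : Prop := out = list_test_alt l1 l2 index
instance (l1 : List (List (String × String))) (l2 : List (List (String × String))) (index : String) (out : List (List (String × String))) : Decidable (Spec_list_test l1 l2 index out) := by unfold Spec_list_test; infer_instance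

-- ===== CLAIM (what is proved, stated in full; the proofs are below) =====
def Claim_equal_list_test : Prop := ∀ (l1 : List (List (String × String))) (l2 : List (List (String × String))) (index : String), Dom_list_test l1 l2 index → Pre_list_test l1 l2 index → Spec_list_test l1 l2 index (list_test l1 l2 index)

-- ===== LEMMAS AND PROOFS =====

-- the key of an element, and the per-key merge both programs compute
def pvKey (index : String) (e : List (String × String)) : String :=
  (PySem.Dict.mk e).getD index ""

def pvMerge (index : String) (xs : List (List (String × String))) (k : String) : PySem.Dict String String :=
  (xs.filter (fun e => pvKey index e == k)).foldl PySem.Dict.update PySem.Dict.empty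

-- a guarded foldl is a foldl over the filtered list
theorem foldl_guard {α β : Type} (p : α → Bool) (f : β → α → β) (l : List α) (acc : β) :
    l.foldl (fun a x => if p x then f a x else a) acc = (l.filter p).foldl f acc := by
  induction l generalizing acc with
  | nil => rfl
  | cons x xs ih =>
    by_cases h : p x = true <;> simp [h, ih]

theorem pvMerge_append_singleton (index : String) (xs : List (List (String × String)))
    (e : List (String × String)) (k : String) :
    pvMerge index (xs ++ [e]) k =
      if pvKey index e == k then (pvMerge index xs k).update e else pvMerge index xs k := by
  unfold pvMerge
  rw [List.filter_append]
  by_cases h : (pvKey index e == k) = true <;> simp [h]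

theorem pvMerge_eq_empty (index : String) (xs : List (List (String × String))) (k : String)
    (h : ∀ e ∈ xs, pvKey index e ≠ k) : pvMerge index xs k = PySem.Dict.empty := by
  unfold pvMerge
  have : xs.filter (fun e => pvKey index e == k) = [] := by
    apply List.filter_eq_nil_iff.mpr
    intro e he
    simpa using h e he
  rw [this]; rfl

-- folding inserts at keys all different from `index` does not change the lookup at `index`
theorem getD_update_of_forall_ne (m : PySem.Dict String String)
    (rest : List (String × String)) (d0 : String) {index : String}
    (h : ∀ pr ∈ rest, pr.1 ≠ index) :
    (PySem.Dict.update m rest).getD index d0 = m.getD index d0 := by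
  induction rest generalizing m with
  | nil => rfl
  | cons pr rest ih =>
    have h1 : pr.1 ≠ index := h pr (by simp)
    rw [show PySem.Dict.update m (pr :: rest) = PySem.Dict.update (m.insert pr.1 pr.2) rest from rfl,
      ih _ (fun q hq => h q (by simp [hq])),
      PySem.Dict.getD_insert_of_ne _ _ _ (Ne.symm h1)]

-- dict.update(e) with e a (duplicate-free) dict carrying `index` sets the lookup to e's value
theorem getD_update_of_contains {index : String} (m : PySem.Dict String String)
    (e : List (String × String)) (d0 : String)
    (hnd : (e.map Prod.fst).Nodup)
    (hc : (PySem.Dict.mk e).contains index = true) :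
    (PySem.Dict.update m e).getD index d0 = (PySem.Dict.mk e).getD index d0 := by
  induction e generalizing m with
  | nil => simp [PySem.Dict.contains_mk] at hc
  | cons pr rest ih =>
    obtain ⟨a, b⟩ := pr
    by_cases h : a = index
    · have hni : ∀ q ∈ rest, q.1 ≠ index := by
        intro q hq
        simp only [List.map_cons, List.nodup_cons] at hnd
        intro hqi
        exact hnd.1 (h ▸ hqi ▸ List.mem_map_of_mem hq)
      rw [show PySem.Dict.update m ((a, b) :: rest) = PySem.Dict.update (m.insert a b) rest from rfl,
        getD_update_of_forall_ne _ _ _ hni, h, PySem.Dict.getD_insert_self,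
        PySem.Dict.getD_eq_get?_getD, PySem.Dict.get?_mk_cons]
      simp
    · have hc' : (PySem.Dict.mk rest).contains index = true := by
        simp only [PySem.Dict.contains_mk, List.any_cons] at hc ⊢
        rcases Bool.or_eq_true_iff.mp hc with h1 | h1
        · exact absurd (by simpa using h1) h
        · exact h1
      have hnd' : (rest.map Prod.fst).Nodup := by
        simp only [List.map_cons, List.nodup_cons] at hnd; exact hnd.2
      rw [show PySem.Dict.update m ((a, b) :: rest) = PySem.Dict.update (m.insert a b) rest from rfl,
        ih _ hnd' hc', PySem.Dict.getD_eq_get?_getD,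
        show ({ items := (a, b) :: rest } : PySem.Dict String String).getD index d0
          = (({ items := (a, b) :: rest } : PySem.Dict String String).get? index).getD d0 from
          PySem.Dict.getD_eq_get?_getD _ _ _,
        PySem.Dict.get?_mk_cons]
      simp [h]

-- the sort key of a merged group is the group's key
theorem getD_pvMerge (index : String) (xs : List (List (String × String))) (k : String)
    (hall : ∀ e ∈ xs, (PySem.Dict.mk e).contains index = true ∧ (e.map Prod.fst).Nodup)
    (hk : k ∈ xs.map (pvKey index)) :
    (pvMerge index xs k).getD index "" = k := by
  unfold pvMerge
  set zs := xs.filter (fun e => pvKey index e == k) with hzs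
  have hne : zs ≠ [] := by
    obtain ⟨e, he, hke⟩ := List.exists_of_mem_map hk
    have : e ∈ zs := by
      rw [hzs]; exact List.mem_filter.mpr ⟨he, by simp [hke]⟩
    exact List.ne_nil_of_mem this
  rcases List.eq_nil_or_concat zs with h | ⟨ws, e, hcat⟩
  · exact absurd h hne
  · rw [List.concat_eq_append] at hcat
    rw [hcat, List.foldl_append]
    have hem : e ∈ zs := by rw [hcat]; simp
    have hex : e ∈ xs := (List.mem_filter.mp (hzs ▸ hem)).1
    have hkk : pvKey index e = k := by
      have := (List.mem_filter.mp (hzs ▸ hem)).2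
      simpa using this
    rw [List.foldl_cons, List.foldl_nil,
      getD_update_of_contains _ _ _ (hall e hex).2 (hall e hex).1]
    exact hkk

-- A's dict, characterized: distinct keys in first-occurrence order, each mapped to its merge
theorem dict_items (index : String) (xs : List (List (String × String))) :
    ((xs.foldl (fun d e =>
        d.insert (pvKey index e) (PySem.Dict.update (d.getD (pvKey index e) PySem.Dict.empty) e))
      PySem.Dict.empty)).items
    = (PySem.Set.ofList (xs.map (pvKey index))).map (fun k => (k, pvMerge index xs k)) := by
  induction xs using List.reverseRecOn with
  | nil => rfl
  | append_singleton ys e ih =>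
    rw [List.foldl_append, List.foldl_cons, List.foldl_nil]
    set d := ys.foldl (fun d e =>
        d.insert (pvKey index e) (PySem.Dict.update (d.getD (pvKey index e) PySem.Dict.empty) e))
      PySem.Dict.empty with hd
    set S := PySem.Set.ofList (ys.map (pvKey index)) with hS
    have hkeys : d.keys = S := by
      show d.items.map Prod.fst = S
      rw [ih, List.map_map]
      exact List.map_id _
    have hSnd : S.Nodup := PySem.Set.nodup_ofList _
    have hRHS : PySem.Set.ofList ((ys ++ [e]).map (pvKey index)) = PySem.Set.add S (pvKey index e) := by
      rw [List.map_append, PySem.Set.ofList_append]; rfl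
    by_cases hc : pvKey index e ∈ ys.map (pvKey index)
    · have hcS : pvKey index e ∈ S := (PySem.Set.mem_ofList _ _).mpr hc
      have hcon : d.contains (pvKey index e) = true :=
        (PySem.Dict.contains_iff_mem_keys _ _).mpr (by rw [hkeys]; exact hcS)
      have hget : d.getD (pvKey index e) PySem.Dict.empty = pvMerge index ys (pvKey index e) := by
        rw [PySem.Dict.getD_eq_get?_getD,
          PySem.Dict.get?_of_mem_items d (by rw [ih]; exact List.mem_map_of_mem hcS)
            (by rw [hkeys]; exact hSnd)]
        rfl
      have hadd : PySem.Set.add S (pvKey index e) = S := by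
        simp [PySem.Set.add, hcS]
      rw [PySem.Dict.items_insert_of_contains _ _ hcon, hget, hRHS, hadd, ih, List.map_map]
      apply List.map_congr_left
      intro k hkS
      by_cases hk : k = pvKey index e
      · subst hk
        simp [pvMerge_append_singleton]
      · have : pvKey index e ≠ k := fun h => hk h.symm
        simp only [Function.comp_apply, beq_iff_eq, if_neg hk,
          pvMerge_append_singleton, beq_iff_eq, if_neg this]
    · have hcS : pvKey index e ∉ S := fun h => hc ((PySem.Set.mem_ofList _ _).mp h)
      have hcon : d.contains (pvKey index e) = false := by
        cases hcontra : d.contains (pvKey index e) with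
        | false => rfl
        | true =>
          exact absurd (by
            have := (PySem.Dict.contains_iff_mem_keys _ _).mp hcontra
            rwa [hkeys] at this) hcS
      have hadd : PySem.Set.add S (pvKey index e) = S ++ [pvKey index e] := by
        simp [PySem.Set.add, hcS]
      have hget : d.getD (pvKey index e) PySem.Dict.empty = PySem.Dict.empty :=
        PySem.Dict.getD_of_not_contains _ _ hcon
      have hmerge_e : pvMerge index (ys ++ [e]) (pvKey index e) = PySem.Dict.update PySem.Dict.empty e := by
        rw [pvMerge_append_singleton, if_pos (by simp),
          pvMerge_eq_empty index ys _ (fun e' he' h => hc (by rw [← h]; exact List.mem_map_of_mem he'))]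
      rw [PySem.Dict.items_insert_of_not_contains _ _ hcon, hget, hRHS, hadd, List.map_append, ih]
      congr 1
      · apply List.map_congr_left
        intro k hkS
        have hk : pvKey index e ≠ k := fun h => hcS (h ▸ hkS)
        rw [pvMerge_append_singleton, if_neg (by simpa using hk)]
      · simp [hmerge_e]

-- A's sorted values, rewritten as the per-key merges in ascending key order
theorem sorted_values (index : String) (xs : List (List (String × String)))
    (hall : ∀ e ∈ xs, (PySem.Dict.mk e).contains index = true ∧ (e.map Prod.fst).Nodup) :
    PySem.List.sorted ((PySem.Set.ofList (xs.map (pvKey index))).map (pvMerge index xs))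
        (fun m => m.getD index "")
      = (PySem.List.sorted (PySem.Set.ofList (xs.map (pvKey index))) (fun k => k)).map
          (pvMerge index xs) := by
  set S := PySem.Set.ofList (xs.map (pvKey index)) with hS
  apply PySem.List.sorted_eq_of_perm_of_pairwise_lt
  · exact (PySem.List.sorted_perm S (fun k => k) false).map _
  · rw [List.pairwise_map]
    apply (PySem.List.sorted_ofList_pairwise_lt (xs.map (pvKey index))).imp_of_mem
    intro a b ha hb hab
    have hkey : ∀ c ∈ PySem.List.sorted S (fun k => k),
        (pvMerge index xs c).getD index "" = c := by
      intro c hcmem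
      have : c ∈ xs.map (pvKey index) := by
        have := (PySem.List.mem_sorted S (fun k => k) false c).mp hcmem
        exact (PySem.Set.mem_ofList _ _).mp this
      exact getD_pvMerge index xs c hall this
    rw [hkey a ha, hkey b hb]
    exact hab

-- ===== VERDICT (by name: the statement is the Claim_ definition above) =====
theorem list_test_spec : Claim_equal_list_test := by
  intro l1 l2 index _hdom hpre
  unfold Spec_list_test list_test list_test_alt
  set g : PySem.Dict String (PySem.Dict String String) → List (String × String) → PySem.Dict String (PySem.Dict String String) :=
    fun d elem =>
      if (PySem.Dict.mk elem).contains index then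
        d.insert ((PySem.Dict.mk elem).getD index "")
          (PySem.Dict.update (d.getD ((PySem.Dict.mk elem).getD index "") PySem.Dict.empty) elem)
      else d with hg
  set p : List (String × String) → Bool := fun e => (PySem.Dict.mk e).contains index with hp
  set xs := (l1 ++ l2).filter p with hxs
  have hall : ∀ e ∈ xs, (PySem.Dict.mk e).contains index = true ∧ (e.map Prod.fst).Nodup := by
    intro e he
    refine ⟨?_, hpre e (List.mem_of_mem_filter he)⟩
    have := (List.mem_filter.mp he).2
    rwa [hp] at this
  have hsplit : [l1, l2].foldl (fun d l => l.foldl g d) PySem.Dict.empty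
      = (l1 ++ l2).foldl g PySem.Dict.empty := by
    show l2.foldl g (l1.foldl g PySem.Dict.empty) = _
    rw [List.foldl_append]
  rw [hsplit, hg]
  rw [foldl_guard (fun elem => (PySem.Dict.mk elem).contains index)
    (fun d elem => d.insert ((PySem.Dict.mk elem).getD index "")
      (PySem.Dict.update (d.getD ((PySem.Dict.mk elem).getD index "") PySem.Dict.empty) elem))
    (l1 ++ l2) PySem.Dict.empty, ← hp, ← hxs]
  have hdi := dict_items index xs
  simp only [pvKey] at hdi
  simp only [PySem.Dict.values, hdi, List.map_map]
  by_cases hxe : xs = []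
  · rw [hxe]
    simp
  · obtain ⟨e0, he0⟩ := List.exists_mem_of_ne_nil xs hxe
    have hS : pvKey index e0 ∈ PySem.Set.ofList (xs.map (pvKey index)) :=
      (PySem.Set.mem_ofList _ _).mpr (List.mem_map_of_mem he0)
    have hSne : PySem.Set.ofList (xs.map (pvKey index)) ≠ [] := List.ne_nil_of_mem hS
    rw [if_neg (by simp [List.isEmpty_iff, hSne])]
    have hsv := sorted_values index xs hall
    rw [show ((fun x => x.2) ∘ fun k => (k, pvMerge index xs k)) = fun k => pvMerge index xs k from rfl]
    rw [hsv]
    rw [PySem.List.foldl_append_singleton_eq_map]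
    simp only [foldl_guard, List.map_map]
    unfold pvMerge pvKey
    simp [Function.comp]
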